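-- pv_equiv track=rewrite | github.com/AyaanRathod/arcade-hackathon | arcade_tools/calendar_optmizer.py | _order_subjects_by_difficulty
-- ===== SOURCE A (Python) =====
-- from typing import Dict, List, Any, Optional
--
-- def _order_subjects_by_difficulty(subjects: List[str]) -> List[str]:
--     """Order subjects by difficulty for optimal scheduling"""
--     difficulty_map = {
--         'math': 9, 'mathematics': 9, 'calculus': 9, 'algebra': 8,
--         'physics': 8, 'chemistry': 7, 'biology': 6,
--         'computer science': 8, 'programming': 8, 'algorithms': 9,
--         'english': 5, 'literature': 5, 'history': 6,
--         'psychology': 6, 'sociology': 5, 'philosophy': 7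
--     }
--
--     subjects_with_difficulty = [
--         (subject, difficulty_map.get(subject.lower(), 5))
--         for subject in subjects
--     ]
--
--     return [subject for subject, _ in sorted(subjects_with_difficulty, key=lambda x: x[1], reverse=True)]
-- ===== SOURCE B (Python) =====
-- def _order_subjects_by_difficulty(subjects):
--     """Order subjects by difficulty for optimal scheduling"""
--     difficulty_map = {
--         'math': 9, 'mathematics': 9, 'calculus': 9, 'algebra': 8,
--         'physics': 8, 'chemistry': 7, 'biology': 6,
--         'computer science': 8, 'programming': 8, 'algorithms': 9,
--         'english': 5, 'literature': 5, 'history': 6,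
--         'psychology': 6, 'sociology': 5, 'philosophy': 7
--     }
--
--     scores = [difficulty_map.get(s.lower(), 5) for s in subjects]
--
--     result = []
--     for target in range(9, 4, -1):
--         for s, sc in zip(subjects, scores):
--             if sc == target:
--                 result.append(s)
--     return result
-- ===== Notes on version B (the rewrite author's own statement) =====
-- stated objective: alternative
-- what changed: Replaces the comparison sort of (subject, score) pairs by score-bucket selection: scores are computed once, then one pass per possible score (9 down to 5) emits the subjects of that score in input order, which reproduces the stable descending sort without sorting.
import Mathlib
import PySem

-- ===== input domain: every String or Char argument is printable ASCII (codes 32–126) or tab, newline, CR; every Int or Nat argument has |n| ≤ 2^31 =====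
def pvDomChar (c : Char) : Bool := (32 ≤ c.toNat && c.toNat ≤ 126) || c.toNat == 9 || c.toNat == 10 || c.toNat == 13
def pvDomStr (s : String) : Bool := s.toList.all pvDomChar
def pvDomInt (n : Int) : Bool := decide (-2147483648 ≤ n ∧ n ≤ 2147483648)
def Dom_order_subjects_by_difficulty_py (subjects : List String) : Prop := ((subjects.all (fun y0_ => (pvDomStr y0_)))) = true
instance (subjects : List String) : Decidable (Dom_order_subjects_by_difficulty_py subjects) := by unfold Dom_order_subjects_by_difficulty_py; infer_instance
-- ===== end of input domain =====

-- B replaces the comparison sort of (subject, score) pairs by one selection pass per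
-- possible score (9 down to 5), emitting the subjects of each score in input order;
-- objective: alternative (no sort, bounded key range).

-- ===== PORT A =====
-- the difficulty_map dict literal (same constant table, used by both programs)
def pvDifficultyMap : PySem.Dict String Int :=
  PySem.Dict.ofList
    [("math", 9), ("mathematics", 9), ("calculus", 9), ("algebra", 8),
     ("physics", 8), ("chemistry", 7), ("biology", 6),
     ("computer science", 8), ("programming", 8), ("algorithms", 9),
     ("english", 5), ("literature", 5), ("history", 6),
     ("psychology", 6), ("sociology", 5), ("philosophy", 7)]

def order_subjects_by_difficulty_py (subjects : List String) : List String :=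
  let subjects_with_difficulty :=
    subjects.map (fun subject => (subject, pvDifficultyMap.getD (PySem.Str.lower subject) 5))
  (PySem.List.sorted subjects_with_difficulty (fun x => x.2) true).map (fun x => x.1)

-- ===== PORT B =====
def order_subjects_by_difficulty_py_alt (subjects : List String) : List String :=
  let scores := subjects.map (fun s => pvDifficultyMap.getD (PySem.Str.lower s) 5)
  (PySem.List.pyRange 9 4 (-1)).foldl
    (fun result target =>
      (subjects.zip scores).foldl
        (fun result p => if p.2 == target then result ++ [p.1] else result) result)
    []

-- ===== PRECONDITION & SPEC =====
def Spec_order_subjects_by_difficulty_py (subjects : List String) (out : List String) : Prop := out = order_subjects_by_difficulty_py_alt subjects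
instance (subjects : List String) (out : List String) : Decidable (Spec_order_subjects_by_difficulty_py subjects out) := by unfold Spec_order_subjects_by_difficulty_py; infer_instance

-- ===== CLAIM (what is proved, stated in full; the proofs are below) =====
def Claim_equal_order_subjects_by_difficulty_py : Prop := ∀ (subjects : List String), Dom_order_subjects_by_difficulty_py subjects → Spec_order_subjects_by_difficulty_py subjects (order_subjects_by_difficulty_py subjects)

-- ===== LEMMAS AND PROOFS =====

-- insertBy walks past a prefix none of whose elements satisfy `before x ·`
theorem pvInsertBy_skip {α : Type} (before : α → α → Bool) (x : α) (l1 l2 : List α)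
    (h : ∀ e ∈ l1, before x e = false) :
    PySem.List.insertBy before x (l1 ++ l2) = l1 ++ PySem.List.insertBy before x l2 := by
  induction l1 with
  | nil => simp
  | cons a t ih =>
    simp only [List.cons_append, PySem.List.insertBy, h a (List.mem_cons_self),
      Bool.false_eq_true, if_false]
    exact congrArg (a :: ·) (ih (fun e he => h e (List.mem_cons_of_mem _ he)))

-- insertBy puts x in front when every element satisfies `before x ·`
theorem pvInsertBy_front {α : Type} (before : α → α → Bool) (x : α) (l : List α)
    (h : ∀ e ∈ l, before x e = true) :
    PySem.List.insertBy before x l = x :: l := by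
  cases l with
  | nil => rfl
  | cons a t => simp [PySem.List.insertBy, h a (List.mem_cons_self)]

-- the stable descending sort with keys drawn from a strictly decreasing value list
-- is the concatenation of the per-value filters, in value order
theorem pvSorted_rev_eq_flatMap_filter {α : Type} (ps : List α) (key : α → Int)
    (vals : List Int) (hv : vals.Pairwise (· > ·)) :
    (∀ p ∈ ps, key p ∈ vals) →
    PySem.List.sorted ps key true = vals.flatMap (fun v => ps.filter (fun p => key p == v)) := by
  rw [PySem.List.sorted_rev_eq_foldl_insertBy]
  induction ps using List.reverseRecOn with
  | nil => intro _; simp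
  | append_singleton ps x ih =>
    intro hmem
    have hmem' : ∀ p ∈ ps, key p ∈ vals := fun p hp => hmem p (by simp [hp])
    obtain ⟨l, r, hsplit⟩ := List.append_of_mem (hmem x (by simp))
    subst hsplit
    rw [List.foldl_append, List.foldl_cons, List.foldl_nil, ih hmem']
    have hlr := (List.pairwise_append.mp hv).2.2
    have hr : ∀ b ∈ r, b < key x :=
      fun b hb => (List.pairwise_cons.mp (List.pairwise_append.mp hv).2.1).1 b hb
    have hl : ∀ a ∈ l, key x < a := fun a ha => hlr a ha (key x) (List.mem_cons_self)
    -- membership in a filter bucket fixes the key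
    have hbucket : ∀ (v : Int) (e : α), e ∈ ps.filter (fun p => key p == v) → key e = v := by
      intro v e he
      exact beq_iff_eq.mp (List.mem_filter.mp he).2
    simp only [List.flatMap_append, List.flatMap_cons, ← List.append_assoc]
    rw [pvInsertBy_skip _ x
      (List.flatMap (fun v => ps.filter (fun p => key p == v)) l ++
        ps.filter (fun p => key p == key x))
      (List.flatMap (fun v => ps.filter (fun p => key p == v)) r)
      (by
        intro e he
        rcases List.mem_append.mp he with he | he
        · obtain ⟨v, hvl, hev⟩ := List.mem_flatMap.mp he
          have h1 := hbucket v e hev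
          have h2 := hl v hvl
          simp only [h1, decide_eq_false_iff_not, not_lt]; omega
        · have h1 := hbucket (key x) e he
          simp only [h1, decide_eq_false_iff_not, not_lt]; omega)]
    rw [pvInsertBy_front _ x _ (by
      intro e he
      obtain ⟨v, hvr, hev⟩ := List.mem_flatMap.mp he
      have h1 := hbucket v e hev
      have h2 := hr v hvr
      simp only [h1, decide_eq_true_eq]; omega)]
    have hLl : (List.flatMap (fun v => (ps ++ [x]).filter (fun p => key p == v)) l)
        = List.flatMap (fun v => ps.filter (fun p => key p == v)) l := by
      refine List.flatMap_congr (fun v hvl => ?_)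
      have hx : (key x == v) = false := beq_eq_false_iff_ne.mpr (by have := hl v hvl; omega)
      simp [List.filter_append, hx]
    have hLr : (List.flatMap (fun v => (ps ++ [x]).filter (fun p => key p == v)) r)
        = List.flatMap (fun v => ps.filter (fun p => key p == v)) r := by
      refine List.flatMap_congr (fun v hvr => ?_)
      have hx : (key x == v) = false := beq_eq_false_iff_ne.mpr (by have := hr v hvr; omega)
      simp [List.filter_append, hx]
    have hLm : (ps ++ [x]).filter (fun p => key p == (key x))
        = ps.filter (fun p => key p == key x) ++ [x] := by
      simp [List.filter_append]
    rw [hLl, hLr, hLm]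
    simp

-- zipping a list with its mapped scores is mapping to pairs
theorem pvZip_map_self {α β : Type} (l : List α) (g : α → β) :
    l.zip (l.map g) = l.map (fun a => (a, g a)) := by
  induction l with
  | nil => rfl
  | cons a t ih => simp [ih]

-- every difficulty score the map can yield lies in [9,8,7,6,5]
theorem pvScore_mem (k : String) :
    pvDifficultyMap.getD k 5 ∈ ([9, 8, 7, 6, 5] : List Int) := by
  rcases h : pvDifficultyMap.get? k with _ | v
  · rw [PySem.Dict.getD_of_get?_eq_none pvDifficultyMap 5 h]; decide
  · rw [PySem.Dict.getD_of_get?_eq_some pvDifficultyMap 5 h]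
    have hm := PySem.Dict.mem_items_of_get?_eq_some pvDifficultyMap h
    have hitems : pvDifficultyMap.items =
      [("math", 9), ("mathematics", 9), ("calculus", 9), ("algebra", 8),
       ("physics", 8), ("chemistry", 7), ("biology", 6),
       ("computer science", 8), ("programming", 8), ("algorithms", 9),
       ("english", 5), ("literature", 5), ("history", 6),
       ("psychology", 6), ("sociology", 5), ("philosophy", 7)] := rfl
    rw [hitems] at hm
    simp only [List.mem_cons, List.not_mem_nil, or_false, Prod.mk.injEq] at hm
    rcases hm with ⟨_, rfl⟩ | ⟨_, rfl⟩ | ⟨_, rfl⟩ | ⟨_, rfl⟩ | ⟨_, rfl⟩ | ⟨_, rfl⟩ | ⟨_, rfl⟩ | ⟨_, rfl⟩ | ⟨_, rfl⟩ | ⟨_, rfl⟩ | ⟨_, rfl⟩ | ⟨_, rfl⟩ | ⟨_, rfl⟩ | ⟨_, rfl⟩ | ⟨_, rfl⟩ | ⟨_, rfl⟩ <;> decide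

theorem order_subjects_by_difficulty_py_eq (subjects : List String) :
    order_subjects_by_difficulty_py subjects = order_subjects_by_difficulty_py_alt subjects := by
  unfold order_subjects_by_difficulty_py order_subjects_by_difficulty_py_alt
  simp only [pvZip_map_self]
  have hrange : PySem.List.pyRange 9 4 (-1) = ([9, 8, 7, 6, 5] : List Int) := by decide
  rw [hrange]
  have hstep : ∀ (acc : List String) (target : Int),
      (subjects.map (fun s => (s, pvDifficultyMap.getD (PySem.Str.lower s) 5))).foldl
        (fun result p => if p.2 == target then result ++ [p.1] else result) acc
      = acc ++ ((subjects.map (fun s => (s, pvDifficultyMap.getD (PySem.Str.lower s) 5))).filter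
          (fun p => p.2 == target)).map (fun p => p.1) := by
    intro acc target
    exact PySem.List.foldl_append_if (fun (p : String × Int) => p.2 == target)
      (fun (p : String × Int) => p.1) _ acc
  simp only [hstep]
  rw [PySem.List.foldl_append_eq_flatMap, List.nil_append]
  rw [pvSorted_rev_eq_flatMap_filter
    (subjects.map (fun subject => (subject, pvDifficultyMap.getD (PySem.Str.lower subject) 5)))
    (fun x : String × Int => x.2) [9, 8, 7, 6, 5] (by decide)
    (by
      intro p hp
      obtain ⟨s, _, rfl⟩ := List.mem_map.mp hp
      exact pvScore_mem (PySem.Str.lower s))]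
  rw [List.map_flatMap]

-- ===== VERDICT (by name: the statement is the Claim_ definition above) =====
theorem order_subjects_by_difficulty_py_spec : Claim_equal_order_subjects_by_difficulty_py := by
  intro subjects _
  unfold Spec_order_subjects_by_difficulty_py
  exact order_subjects_by_difficulty_py_eq subjects
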